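-- pv_equiv track=rewrite | github.com/sshvsk/lessons | lesson_07/solutions_02.py | country_to_city
-- ===== SOURCE A (Python) =====
-- def country_to_city(city):
--     mapping = {
--         "USA": ["Houston", "Chicago", "Atlanta"],
--         "Japan": ["Tokyo", "Kyoto", "Sendai"],
--         "Switzerland": ["Zurich", "Basel", "Geneva"]
--     }
--     for country, city_list in mapping.items():
--         if city in city_list:
--             return country
-- ===== SOURCE B (Python) =====
-- def country_to_city(city):
--     mapping = {
--         "USA": ["Houston", "Chicago", "Atlanta"],
--         "Japan": ["Tokyo", "Kyoto", "Sendai"],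
--         "Switzerland": ["Zurich", "Basel", "Geneva"]
--     }
--     inverted = {c: country for country, cities in mapping.items() for c in cities}
--     return inverted.get(city)
-- ===== Notes on version B (the rewrite author's own statement) =====
-- stated objective: idiomatic
-- what changed: Replaces the scan-each-country membership loop with a flattened inverted city-to-country index built once, followed by a single dict lookup (get returns None for absent cities, matching A's fall-through).
import Mathlib
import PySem

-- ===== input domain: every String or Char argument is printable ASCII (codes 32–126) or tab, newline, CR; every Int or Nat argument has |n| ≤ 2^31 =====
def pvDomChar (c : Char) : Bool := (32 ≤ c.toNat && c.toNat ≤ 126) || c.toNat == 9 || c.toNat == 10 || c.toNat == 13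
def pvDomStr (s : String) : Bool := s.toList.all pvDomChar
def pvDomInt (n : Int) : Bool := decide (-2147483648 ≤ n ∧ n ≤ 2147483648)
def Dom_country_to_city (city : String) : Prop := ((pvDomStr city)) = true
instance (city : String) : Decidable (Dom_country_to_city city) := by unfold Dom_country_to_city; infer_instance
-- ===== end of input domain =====

-- B builds an inverted city→country index once and does a single lookup instead of A's
-- membership scan over each country's list (objective: idiomatic).

-- ===== PORT A =====
-- the dict literal `mapping` in insertion order
def ctcMapping : List (String × List String) :=
  [("USA", ["Houston", "Chicago", "Atlanta"]),
   ("Japan", ["Tokyo", "Kyoto", "Sendai"]),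
   ("Switzerland", ["Zurich", "Basel", "Geneva"])]

-- `for country, city_list in mapping.items(): if city in city_list: return country`
def ctcLoop (city : String) : List (String × List String) → Option String
  | [] => none
  | (country, city_list) :: rest =>
      if city_list.contains city then some country else ctcLoop city rest

def country_to_city (city : String) : Option String :=
  ctcLoop city ctcMapping

-- ===== PORT B =====
-- the flattened dict comprehension {c: country for country, cities in mapping.items() for c in cities}
def ctcInverted : PySem.Dict String String :=
  ctcMapping.foldl (fun d p => p.2.foldl (fun d c => d.insert c p.1) d) PySem.Dict.empty

def country_to_city_alt (city : String) : Option String :=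
  ctcInverted.get? city

-- ===== PRECONDITION & SPEC =====
def Spec_country_to_city (city : String) (out : Option String) : Prop := out = country_to_city_alt city
instance (city : String) (out : Option String) : Decidable (Spec_country_to_city city out) := by unfold Spec_country_to_city; infer_instance

-- ===== CLAIM (what is proved, stated in full; the proofs are below) =====
def Claim_equal_country_to_city : Prop := ∀ (city : String), Dom_country_to_city city → Spec_country_to_city city (country_to_city city)

-- ===== LEMMAS AND PROOFS =====
theorem ctc_eq (city : String) : country_to_city city = country_to_city_alt city := by
  by_cases h1 : city = "Houston" <;> by_cases h2 : city = "Chicago" <;>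
  by_cases h3 : city = "Atlanta" <;> by_cases h4 : city = "Tokyo" <;>
  by_cases h5 : city = "Kyoto" <;> by_cases h6 : city = "Sendai" <;>
  by_cases h7 : city = "Zurich" <;> by_cases h8 : city = "Basel" <;>
  by_cases h9 : city = "Geneva" <;> subst_vars <;>
    simp_all [country_to_city, country_to_city_alt, ctcLoop, ctcMapping, ctcInverted,
      PySem.Dict.empty, PySem.Dict.insert, PySem.Dict.get?, PySem.Dict.contains] <;>
    exact ⟨Ne.symm h1, Ne.symm h2, Ne.symm h3, Ne.symm h4, Ne.symm h5, Ne.symm h6, Ne.symm h7,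
      Ne.symm h8, Ne.symm h9⟩

-- ===== VERDICT (by name: the statement is the Claim_ definition above) =====
theorem country_to_city_spec : Claim_equal_country_to_city := by
  intro city _
  exact ctc_eq city
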